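-- pv_equiv track=rewrite | github.com/David060195/codeSignal_companyChallenges | Quora/mostViewedWriters.py | solution
-- ===== SOURCE A (Python) =====
-- from collections import defaultdict
--
-- def solution(topicIds, answerIds, views):
--     topicsIndex = defaultdict(list)
--     for index, topic in enumerate(topicIds):
--         for topicId in topic:
--             topicsIndex[topicId].append(index)
--     answerToViews = {}
--     for view in views:
--         answerToViews[view[0]] = view
--     def getViewByAnswerId(topicId):
--         totalAnswers = []
--         countViewsById = defaultdict(int)
--         for index in topicsIndex[topicId]:
--             for answer in answerIds[index]:
--                 totalAnswers.append(answer)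
--         for answer in totalAnswers:
--             viewArr = answerToViews[answer]
--             countViewsById[viewArr[1]] += viewArr[2]
--         res = []
--         for key, value in countViewsById.items():
--             res.append([key, value])
--         res.sort(key = lambda x : (x[1], -x[0]), reverse = True)
--         return res
--     res = []
--     for topic in sorted(topicsIndex.keys()):
--         res.append(getViewByAnswerId(topic))
--     return res
-- ===== SOURCE B (Python) =====
-- from collections import defaultdict
--
-- def solution(topicIds, answerIds, views):
--     answerToViews = {}
--     for view in views:
--         answerToViews[view[0]] = view
--     agg = {}
--     for index, topics in enumerate(topicIds):
--         for topicId in topics: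
--             inner = agg.get(topicId, defaultdict(int))
--             for answer in answerIds[index]:
--                 viewArr = answerToViews[answer]
--                 inner[viewArr[1]] += viewArr[2]
--             agg[topicId] = inner
--     res = []
--     for topic in sorted(agg):
--         rows = sorted(agg[topic].items(), key=lambda p: (-p[1], p[0]))
--         res.append([[w, t] for w, t in rows])
--     return res
-- ===== Notes on version B (the rewrite author's own statement) =====
-- stated objective: simpler
-- what changed: A builds an inverted topic->row-indices index and then re-scans answer rows once per topic inside a helper; B makes a single fused pass over the rows that directly maintains a nested topic->writer->views table and only formats it at the end (equal sort order since writer keys are unique).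
import Mathlib
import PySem

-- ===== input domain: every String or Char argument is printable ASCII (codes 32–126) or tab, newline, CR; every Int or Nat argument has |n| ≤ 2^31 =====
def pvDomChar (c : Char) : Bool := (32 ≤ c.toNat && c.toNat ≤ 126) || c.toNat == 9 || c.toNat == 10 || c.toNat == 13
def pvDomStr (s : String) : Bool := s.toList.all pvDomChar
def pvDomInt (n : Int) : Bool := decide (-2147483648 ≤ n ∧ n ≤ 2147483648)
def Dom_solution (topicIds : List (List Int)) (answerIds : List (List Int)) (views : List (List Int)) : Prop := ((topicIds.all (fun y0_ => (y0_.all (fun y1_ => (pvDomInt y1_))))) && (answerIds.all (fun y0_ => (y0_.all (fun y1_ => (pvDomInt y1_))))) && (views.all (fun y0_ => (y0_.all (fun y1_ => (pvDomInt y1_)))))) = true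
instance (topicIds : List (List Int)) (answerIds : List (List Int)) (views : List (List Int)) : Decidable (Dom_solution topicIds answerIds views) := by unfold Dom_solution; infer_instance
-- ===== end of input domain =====

-- B re-implements A by one fused accumulation pass over the rows into a nested topic→writer→views table,
-- instead of A's inverted index plus a per-topic re-scan; objective: simpler decomposition (no speed claim).

-- answerToViews: answer id → its views row, last write wins (identical loop in both Pythons, hence shared)
def pvA2V (views : List (List Int)) : PySem.Dict Int (List Int) :=
  views.foldl (fun d v => d.insert (PySem.List.pyGetD v 0 0) v) PySem.Dict.empty

-- countViewsById[viewArr[1]] += viewArr[2] (identical line in both Pythons, hence shared)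
def pvBump (a2v : PySem.Dict Int (List Int)) (d : PySem.Dict Int Int) (a : Int) : PySem.Dict Int Int :=
  let viewArr := a2v.getD a []
  d.modify (PySem.List.pyGetD viewArr 1 0) 0 (fun c => c + PySem.List.pyGetD viewArr 2 0)

-- ===== PORT A =====
def solution (topicIds : List (List Int)) (answerIds : List (List Int)) (views : List (List Int)) : List (List (List Int)) :=
  let topicsIndex : PySem.Dict Int (List Int) :=
    (PySem.List.enumerate topicIds 0).foldl
      (fun d p => p.2.foldl (fun d t => d.modify t [] (fun l => l ++ [p.1])) d) PySem.Dict.empty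
  let answerToViews := pvA2V views
  let getViewByAnswerId : Int → List (List Int) := fun topicId =>
    let totalAnswers : List Int :=
      (topicsIndex.getD topicId []).foldl (fun acc i => acc ++ PySem.List.pyGetD answerIds i []) []
    let countViewsById : PySem.Dict Int Int :=
      totalAnswers.foldl (pvBump answerToViews) PySem.Dict.empty
    let res : List (List Int) := countViewsById.items.foldl (fun r p => r ++ [[p.1, p.2]]) []
    PySem.List.sorted2 res (fun x => PySem.List.pyGetD x 1 0) (fun x => -(PySem.List.pyGetD x 0 0)) true
  (PySem.List.sorted topicsIndex.keys (fun k => k) false).foldl (fun r t => r ++ [getViewByAnswerId t]) []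

-- ===== PORT B =====
def solution_alt (topicIds : List (List Int)) (answerIds : List (List Int)) (views : List (List Int)) : List (List (List Int)) :=
  let answerToViews := pvA2V views
  let agg : PySem.Dict Int (PySem.Dict Int Int) :=
    (PySem.List.enumerate topicIds 0).foldl
      (fun g p => p.2.foldl
        (fun g t => g.insert t
          ((PySem.List.pyGetD answerIds p.1 []).foldl (pvBump answerToViews) (g.getD t PySem.Dict.empty)))
        g) PySem.Dict.empty
  (PySem.List.sorted agg.keys (fun k => k) false).foldl
    (fun r t => r ++ [(PySem.List.sorted2 (agg.getD t PySem.Dict.empty).items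
        (fun p => -p.2) (fun p => p.1) false).map (fun p => [p.1, p.2])]) []

-- ===== PRECONDITION & SPEC =====
-- Pre_ excludes exactly the inputs where the Python A raises: an empty views row (view[0] IndexError),
-- a row with topics but no answerIds row at that index (IndexError), or a referenced answer whose
-- views row is missing (KeyError) or shorter than 3 entries (IndexError).
def Pre_solution (topicIds : List (List Int)) (answerIds : List (List Int)) (views : List (List Int)) : Prop :=
  (∀ v ∈ views, v ≠ []) ∧
  ∀ i ∈ List.range topicIds.length, topicIds.getD i [] ≠ [] →
    i < answerIds.length ∧
    ∀ a ∈ answerIds.getD i [], 3 ≤ ((views.reverse.find? (fun w => w.headI == a)).getD []).length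
instance (topicIds : List (List Int)) (answerIds : List (List Int)) (views : List (List Int)) : Decidable (Pre_solution topicIds answerIds views) := by unfold Pre_solution; infer_instance

def pvWitness_solution : List (List Int) × List (List Int) × List (List Int) := ([[1]], [[5]], [[5, 7, 3]])

def Spec_solution (topicIds : List (List Int)) (answerIds : List (List Int)) (views : List (List Int)) (out : List (List (List Int))) : Prop := out = solution_alt topicIds answerIds views
instance (topicIds : List (List Int)) (answerIds : List (List Int)) (views : List (List Int)) (out : List (List (List Int))) : Decidable (Spec_solution topicIds answerIds views out) := by unfold Spec_solution; infer_instance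

-- ===== CLAIM (what is proved, stated in full; the proofs are below) =====
def Claim_equal_solution : Prop := ∀ (topicIds : List (List Int)) (answerIds : List (List Int)) (views : List (List Int)), Dom_solution topicIds answerIds views → Pre_solution topicIds answerIds views → Spec_solution topicIds answerIds views (solution topicIds answerIds views)

-- ===== LEMMAS AND PROOFS =====

theorem pv_lex_decide (x1 x2 y1 y2 : Int) :
    decide (toLex (x1, x2) < toLex (y1, y2)) = (decide (x1 < y1) || (!decide (y1 < x1) && decide (x2 < y2))) := by
  rcases lt_trichotomy x1 y1 with h | h | h <;>
    simp [Prod.Lex.lt_iff, h, not_lt_of_gt]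

theorem pv_sorted2_toLex {α : Type} (xs : List α) (k1 k2 : α → Int) (rev : Bool) :
    PySem.List.sorted2 xs k1 k2 rev = PySem.List.sorted xs (fun x => toLex (k1 x, k2 x)) rev := by
  unfold PySem.List.sorted2 PySem.List.sorted
  have hb : (fun a b => decide (k1 a < k1 b) || (!decide (k1 b < k1 a) && decide (k2 a < k2 b)))
      = (fun a b : α => decide (toLex (k1 a, k2 a) < toLex (k1 b, k2 b))) := by
    funext a b; rw [pv_lex_decide]
  rw [hb]

theorem pv_rowSort (l : List (Int × Int)) (h : (l.map Prod.fst).Nodup) :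
    PySem.List.sorted2 (l.map (fun p => [p.1, p.2])) (fun x => PySem.List.pyGetD x 1 0)
        (fun x => -(PySem.List.pyGetD x 0 0)) true
      = (PySem.List.sorted2 l (fun p => -p.2) (fun p => p.1) false).map (fun p => [p.1, p.2]) := by
  rw [pv_sorted2_toLex, pv_sorted2_toLex]
  have hperm : (PySem.List.sorted l (fun p : Int × Int => toLex (-p.2, p.1)) false).Perm l :=
    PySem.List.sorted_perm l _ false
  have h1 : List.Pairwise (fun p q : Int × Int => toLex (-p.2, p.1) ≤ toLex (-q.2, q.1))
      (PySem.List.sorted l (fun p : Int × Int => toLex (-p.2, p.1)) false) :=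
    PySem.List.sorted_pairwise l _
  have h2 : List.Pairwise (fun p q : Int × Int => p.1 ≠ q.1)
      (PySem.List.sorted l (fun p : Int × Int => toLex (-p.2, p.1)) false) := by
    have : ((PySem.List.sorted l (fun p : Int × Int => toLex (-p.2, p.1)) false).map Prod.fst).Nodup :=
      ((hperm.map Prod.fst).symm).nodup h
    simpa [List.Nodup, List.pairwise_map] using this
  apply PySem.List.sorted_rev_eq_of_perm_of_pairwise_gt
  · exact hperm.map _
  · rw [List.pairwise_map]
    refine (h1.and h2).imp ?_
    rintro p q ⟨hle, hne⟩
    have hlt : toLex ((-p.2 : Int), p.1) < toLex ((-q.2 : Int), q.1) := by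
      refine lt_of_le_of_ne hle ?_
      intro heq
      apply hne
      have := congrArg (fun z => (ofLex z).2) heq
      simpa using this
    rw [Prod.Lex.lt_iff] at hlt
    simp only [ofLex_toLex] at hlt
    have hgoal : toLex ((q.2 : Int), -q.1) < toLex ((p.2 : Int), -p.1) := by
      rw [Prod.Lex.lt_iff]
      simp only [ofLex_toLex]
      omega
    simpa using hgoal


theorem pv_keysA (L : List (Int × List Int)) (d : PySem.Dict Int (List Int)) :
    ((L.foldl (fun d p => p.2.foldl (fun d t => d.modify t [] (fun l => l ++ [p.1])) d) d)).keys
      = L.foldl (fun ks p => PySem.Set.update ks p.2) d.keys := by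
  induction L generalizing d with
  | nil => rfl
  | cons p L ih => simp only [List.foldl_cons, ih, PySem.Dict.keys_foldl_modify]

theorem pv_keysB {ν : Type} (f : Int × List Int → PySem.Dict Int ν → Int → ν) (L : List (Int × List Int)) (g : PySem.Dict Int ν) :
    ((L.foldl (fun g p => p.2.foldl (fun g t => g.insert t (f p g t)) g) g)).keys
      = L.foldl (fun ks p => PySem.Set.update ks p.2) g.keys := by
  induction L generalizing g with
  | nil => rfl
  | cons p L ih => simp only [List.foldl_cons, ih, PySem.Dict.keys_foldl_insert]

theorem pv_getDA_row (i t : Int) (topic : List Int) (d : PySem.Dict Int (List Int)) :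
    ((topic.foldl (fun d tt => d.modify tt [] (fun l => l ++ [i])) d)).getD t []
      = d.getD t [] ++ (topic.filter (fun x => x == t)).map (fun _ => i) := by
  induction topic generalizing d with
  | nil => simp
  | cons tt topic ih =>
    simp only [List.foldl_cons, ih, PySem.Dict.getD_modify, List.filter_cons]
    by_cases h : tt = t
    · subst h; simp
    · simp [h, Ne.symm h]

theorem pv_getDA (t : Int) (L : List (Int × List Int)) (d : PySem.Dict Int (List Int)) :
    ((L.foldl (fun d p => p.2.foldl (fun d tt => d.modify tt [] (fun l => l ++ [p.1])) d) d)).getD t []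
      = d.getD t [] ++ L.flatMap (fun p => (p.2.filter (fun x => x == t)).map (fun _ => p.1)) := by
  induction L generalizing d with
  | nil => simp
  | cons p L ih => simp only [List.foldl_cons, ih, pv_getDA_row, List.flatMap_cons, List.append_assoc]

theorem pv_getDB_row (bump : PySem.Dict Int Int → Int → PySem.Dict Int Int) (row : List Int)
    (t : Int) (topic : List Int) (g : PySem.Dict Int (PySem.Dict Int Int)) :
    ((topic.foldl (fun g tt => g.insert tt (row.foldl bump (g.getD tt PySem.Dict.empty))) g)).getD t PySem.Dict.empty
      = ((topic.filter (fun x => x == t)).flatMap (fun _ => row)).foldl bump (g.getD t PySem.Dict.empty) := by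
  induction topic generalizing g with
  | nil => simp
  | cons tt topic ih =>
    simp only [List.foldl_cons, ih, PySem.Dict.getD_insert, List.filter_cons]
    by_cases h : tt = t
    · subst h; simp [List.foldl_append]
    · simp [h, Ne.symm h]

theorem pv_getDB (bump : PySem.Dict Int Int → Int → PySem.Dict Int Int) (row : Int → List Int)
    (t : Int) (L : List (Int × List Int)) (g : PySem.Dict Int (PySem.Dict Int Int)) :
    ((L.foldl (fun g p => p.2.foldl (fun g tt => g.insert tt ((row p.1).foldl bump (g.getD tt PySem.Dict.empty))) g) g)).getD t PySem.Dict.empty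
      = (L.flatMap (fun p => (p.2.filter (fun x => x == t)).flatMap (fun _ => row p.1))).foldl bump (g.getD t PySem.Dict.empty) := by
  induction L generalizing g with
  | nil => simp
  | cons p L ih => simp only [List.foldl_cons, ih, pv_getDB_row, List.flatMap_cons, List.foldl_append]


theorem pv_nodup_bump (a2v : PySem.Dict Int (List Int)) (seq : List Int) :
    ((List.foldl (pvBump a2v) PySem.Dict.empty seq).items.map Prod.fst).Nodup := by
  have h := PySem.Dict.nodup_keys_foldl_modify_key seq
      (fun a => PySem.List.pyGetD (a2v.getD a []) 1 0) 0
      (fun _ a => fun c => c + PySem.List.pyGetD (a2v.getD a []) 2 0) PySem.Dict.empty (by simp)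
  exact h

-- ===== VERDICT (by name: the statement is the Claim_ definition above) =====
theorem solution_spec : Claim_equal_solution := by
  unfold Claim_equal_solution
  intro topicIds answerIds views _ _
  unfold Spec_solution solution solution_alt
  simp only [PySem.List.foldl_append_singleton_eq_map, List.nil_append]
  rw [pv_keysA, pv_keysB (fun p g t => List.foldl (pvBump (pvA2V views)) (g.getD t PySem.Dict.empty) (PySem.List.pyGetD answerIds p.1 []))]
  refine List.map_congr_left ?_
  intro t _
  rw [PySem.List.foldl_append_eq_flatMap, List.nil_append, pv_getDA,
    pv_getDB (pvBump (pvA2V views)) (fun i => PySem.List.pyGetD answerIds i [])]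
  simp only [PySem.Dict.getD_empty, List.nil_append, List.flatMap_assoc, List.flatMap_map]
  rw [pv_rowSort _ (pv_nodup_bump (pvA2V views) _)]
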